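-- pv_equiv track=rewrite | github.com/AlgotAxelzon/aoc-2020 | 14/solution.py | replace_xs
-- ===== SOURCE A (Python) =====
-- def replace_xs(string_w_xs):
--     res = [string_w_xs]
--     while True in [hasX(c) for c in res]:
--         for i in range(0, len(res)):
--             if "X" in res[i]:
--                 replaced = replace_first_x(res[i])
--                 res[i] = replaced[0]
--                 res.append(replaced[1])
--     return res
--
-- def hasX(string_w_xs):
--     return "X" in string_w_xs
--
-- def replace_first_x(string_w_xs):
--     list_w_xs = [c for c in string_w_xs]
--     for i in range(0, len(list_w_xs)):
--         if list_w_xs[i] == "X":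
--             r1 = list_w_xs.copy()
--             r2 = list_w_xs.copy()
--             r1[i] = "1"
--             r2[i] = "0"
--             return [''.join(r1), ''.join(r2)]
--     return None
-- ===== SOURCE B (Python) =====
-- def replace_xs(string_w_xs):
--     chars = list(string_w_xs)
--     positions = [i for i, c in enumerate(chars) if c == 'X']
--     out = []
--     for t in range(2 ** len(positions)):
--         cur = chars.copy()
--         u = t
--         for p in positions:
--             cur[p] = '0' if u & 1 else '1'
--             u >>= 1
--         out.append(''.join(cur))
--     return out
-- ===== Notes on version B (the rewrite author's own statement) =====
-- stated objective: simpler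
-- what changed: B precomputes the X positions once and directly generates the 2^k strings by assigning the bits of each index t (LSB at the leftmost X, bit 0 -> '1', bit 1 -> '0') to those positions, instead of A's repeated whole-list rescans with in-place replace-first-X expansion and appends.
import Mathlib
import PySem

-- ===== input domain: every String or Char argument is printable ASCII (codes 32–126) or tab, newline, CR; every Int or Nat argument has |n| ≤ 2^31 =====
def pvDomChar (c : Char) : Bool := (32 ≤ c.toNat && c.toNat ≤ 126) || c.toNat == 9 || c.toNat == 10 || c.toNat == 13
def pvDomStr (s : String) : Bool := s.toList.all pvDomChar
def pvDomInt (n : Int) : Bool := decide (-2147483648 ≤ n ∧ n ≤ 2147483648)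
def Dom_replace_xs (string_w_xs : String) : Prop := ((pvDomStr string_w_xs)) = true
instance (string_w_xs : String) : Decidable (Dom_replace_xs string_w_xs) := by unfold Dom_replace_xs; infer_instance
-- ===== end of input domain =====

-- B enumerates all bit assignments for the X positions directly (one pass over 2^k indices)
-- instead of A's repeated in-place list expansion; objective: simpler/faster single-pass generation.

-- ===== PORT A =====

-- hasX(c) = "X" in c
def pvHasX (s : String) : Bool := PySem.Str.isIn "X" s

-- the for-loop of replace_first_x: scan indices, replace the first 'X' by '1'/'0'
def pvRfxLoop (orig : List Char) (i : Nat) : Option (List String) :=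
  if h : i < orig.length then
    if orig[i] = 'X' then
      some [String.ofList (orig.set i '1'), String.ofList (orig.set i '0')]
    else pvRfxLoop orig (i + 1)
  else none
termination_by orig.length - i

def pvReplaceFirstX (s : String) : Option (List String) := pvRfxLoop s.toList 0

-- the inner 'for i in range(0, len(res))' pass: len(res) is fixed at n0 on entry,
-- res[i] is replaced in place and the 0-variant appended
def pvPassLoop (res : List String) (i n0 : Nat) : List String :=
  if _h : i < n0 then
    let cur := res.getD i ""
    if pvHasX cur then
      match pvReplaceFirstX cur with
      | some [r1, r2] => pvPassLoop ((res.set i r1) ++ [r2]) (i + 1) n0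
      | _ => res  -- unreachable: guarded by pvHasX (Python would raise on None)
    else pvPassLoop res (i + 1) n0
  else res
termination_by n0 - i

-- the 'while True in [hasX(c) for c in res]' loop; fuel (count of 'X' + 1) is a totality
-- guard only: one pass strips one X from every element, so this fuel always suffices
def pvLoopA (fuel : Nat) (res : List String) : List String :=
  match fuel with
  | 0 => res
  | f + 1 =>
    if (res.map (fun c => pvHasX c)).contains true then
      pvLoopA f (pvPassLoop res 0 res.length)
    else res

def replace_xs (string_w_xs : String) : List String :=
  pvLoopA (string_w_xs.toList.count 'X' + 1) [string_w_xs]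

-- ===== PORT B =====

-- positions = [i for i, c in enumerate(chars) if c == 'X']  (indices are ≥ 0, so .toNat is exact)
def pvXPositions (cs : List Char) : List Nat :=
  ((PySem.List.enumerate cs).filter (fun pc => pc.2 == 'X')).map (fun pc => pc.1.toNat)

-- the inner loop: for p in positions: cur[p] = '0' if u & 1 else '1'; u >>= 1
def pvFill (cur : List Char) (ps : List Nat) (u : Nat) : List Char :=
  match ps with
  | [] => cur
  | p :: ps' => pvFill (cur.set p (if u % 2 = 1 then '0' else '1')) ps' (u / 2)

def replace_xs_alt (string_w_xs : String) : List String :=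
  let chars := string_w_xs.toList
  let positions := pvXPositions chars
  (List.range (2 ^ positions.length)).map (fun t => String.ofList (pvFill chars positions t))

-- ===== PRECONDITION & SPEC =====
def Spec_replace_xs (string_w_xs : String) (out : List String) : Prop := out = replace_xs_alt string_w_xs
instance (string_w_xs : String) (out : List String) : Decidable (Spec_replace_xs string_w_xs out) := by unfold Spec_replace_xs; infer_instance

-- ===== CLAIM (what is proved, stated in full; the proofs are below) =====
def Claim_equal_replace_xs : Prop := ∀ (string_w_xs : String), Dom_replace_xs string_w_xs → Spec_replace_xs string_w_xs (replace_xs string_w_xs)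

-- ===== LEMMAS AND PROOFS =====

-- replace the first 'X' of a char list by b
def cRep (b : Char) : List Char → List Char
  | [] => []
  | c :: cs => if c = 'X' then b :: cs else c :: cRep b cs

-- positions of 'X'
def xpos : List Char → List Nat
  | [] => []
  | c :: cs => if c = 'X' then 0 :: (xpos cs).map (· + 1) else (xpos cs).map (· + 1)

def pvS1 (s : String) : String := String.ofList (cRep '1' s.toList)
def pvS0 (s : String) : String := String.ofList (cRep '0' s.toList)

-- c uniform expansion passes
def expandN : Nat → List String → List String
  | 0, res => res
  | c + 1, res => expandN c (res.map pvS1 ++ res.map pvS0)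

-- replace the first c X's according to the bits of t (LSB first; bit 0 → '1', bit 1 → '0')
def bAL : Nat → Nat → List Char → List Char
  | 0, _, cs => cs
  | c + 1, t, cs => bAL c (t / 2) (cRep (if t % 2 = 1 then '0' else '1') cs)

def bA (c t : Nat) (s : String) : String := String.ofList (bAL c t s.toList)

theorem hasX_eq (s : String) : pvHasX s = s.toList.contains 'X' := by
  by_cases h : 'X' ∈ s.toList
  · simp [pvHasX, h, PySem.Chars.isIn_iff_infix, List.singleton_infix_iff]
  · simp [pvHasX, h, PySem.Chars.isIn_eq_false_iff, List.singleton_infix_iff]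

theorem cRep_append (b : Char) (a l : List Char) (ha : ∀ c ∈ a, c ≠ 'X') :
    cRep b (a ++ l) = a ++ cRep b l := by
  induction a with
  | nil => rfl
  | cons c a ih =>
    have hc : c ≠ 'X' := ha c (by simp)
    simp only [List.cons_append, cRep, if_neg hc]
    rw [ih (fun d hd => ha d (by simp [hd]))]

theorem rfx_aux (b : List Char) : ∀ (a : List Char), (∀ c ∈ a, c ≠ 'X') →
    pvRfxLoop (a ++ b) a.length =
      (if 'X' ∈ b then
        some [String.ofList (a ++ cRep '1' b), String.ofList (a ++ cRep '0' b)]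
      else none) := by
  induction b with
  | nil =>
    intro a _
    rw [pvRfxLoop]
    simp
  | cons c b ih =>
    intro a ha
    rw [pvRfxLoop]
    have hlt : a.length < (a ++ c :: b).length := by simp
    have hget : (a ++ c :: b)[a.length]'hlt = c := by
      simp
    rw [dif_pos hlt]
    by_cases hc : c = 'X'
    · subst hc
      simp only [hget, if_pos rfl]
      have hset : ∀ ch : Char, (a ++ 'X' :: b).set a.length ch = a ++ ch :: b := by
        intro ch
        rw [List.set_append_right _ _ (le_refl _)]
        simp
      simp [hset, cRep, cRep_append _ _ _ ha]
    · simp only [hget, if_neg hc]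
      have ha' : ∀ d ∈ a ++ [c], d ≠ 'X' := by
        intro d hd
        rcases List.mem_append.1 hd with h | h
        · exact ha d h
        · simp at h; simpa [h] using hc
      have hsplit : a ++ c :: b = (a ++ [c]) ++ b := by simp
      rw [hsplit]
      have hlen : a.length + 1 = (a ++ [c]).length := by simp
      rw [hlen, ih (a ++ [c]) ha']
      by_cases hb : 'X' ∈ b
      · rw [if_pos hb, if_pos (by simp [hb])]
        simp only [cRep, if_neg hc, List.append_assoc, List.singleton_append]
      · rw [if_neg hb, if_neg (by simp [hb]; intro h; exact hc h.symm)]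

theorem rfx_eq (s : String) (h : 'X' ∈ s.toList) :
    pvReplaceFirstX s = some [pvS1 s, pvS0 s] := by
  unfold pvReplaceFirstX
  have := rfx_aux s.toList [] (by simp)
  simpa [h, pvS1, pvS0] using this

theorem pass_inv (b : List String) : ∀ (a : List String), (∀ x ∈ b, pvHasX x = true) →
    pvPassLoop (a.map pvS1 ++ b ++ a.map pvS0) a.length (a.length + b.length) =
      (a ++ b).map pvS1 ++ (a ++ b).map pvS0 := by
  induction b with
  | nil =>
    intro a _
    rw [pvPassLoop]
    simp
  | cons x b' ih =>
    intro a hb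
    rw [pvPassLoop]
    have hlt : a.length < a.length + (x :: b').length := by simp
    rw [dif_pos hlt]
    have hcur : (a.map pvS1 ++ (x :: b') ++ a.map pvS0).getD a.length "" = x := by
      rw [List.append_assoc, List.getD_eq_getElem?_getD,
        List.getElem?_append_right (by simp)]
      simp
    have hX : pvHasX x = true := hb x (by simp)
    have hmem : 'X' ∈ x.toList := by
      have h1 := hasX_eq x
      rw [hX] at h1
      simpa using h1.symm
    simp only [hcur, hX, if_pos, rfx_eq x hmem]
    have hset : (a.map pvS1 ++ (x :: b') ++ a.map pvS0).set a.length (pvS1 x)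
        = a.map pvS1 ++ (pvS1 x :: b') ++ a.map pvS0 := by
      rw [List.append_assoc, List.append_assoc,
        List.set_append_right _ _ (by simp)]
      simp
    rw [hset]
    have e1 : (a.map pvS1 ++ (pvS1 x :: b') ++ a.map pvS0) ++ [pvS0 x]
        = (a ++ [x]).map pvS1 ++ b' ++ (a ++ [x]).map pvS0 := by
      simp [List.append_assoc]
    have e2 : a.length + 1 = (a ++ [x]).length := by simp
    have e3 : a.length + (x :: b').length = (a ++ [x]).length + b'.length := by
      simp; omega
    rw [e1, e2, e3, ih (a ++ [x]) (fun y hy => hb y (by simp [hy]))]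
    simp [List.append_assoc]

theorem count_cRep (b : Char) (hb : b ≠ 'X') (cs : List Char) (h : 'X' ∈ cs) :
    (cRep b cs).count 'X' + 1 = cs.count 'X' := by
  induction cs with
  | nil => simp at h
  | cons c cs ih =>
    by_cases hc : c = 'X'
    · subst hc; simp [cRep, List.count_cons, hb]
    · have h' : 'X' ∈ cs := by simpa [hc, Ne.symm hc] using h
      have : (c == 'X') = false := by simp [hc]
      simp only [cRep, if_neg hc, List.count_cons, this, if_false, Bool.false_eq_true]
      simp [ih h']
      

theorem expandN_nil (c : Nat) : expandN c [] = [] := by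
  induction c with
  | zero => rfl
  | succ c ih => simpa [expandN] using ih

theorem loop_main (c : Nat) : ∀ (fuel : Nat) (res : List String), c < fuel →
    (∀ x ∈ res, x.toList.count 'X' = c) → pvLoopA fuel res = expandN c res := by
  induction c with
  | zero =>
    intro fuel res hf h0
    obtain ⟨f, rfl⟩ : ∃ f, fuel = f + 1 := ⟨fuel - 1, by omega⟩
    rw [pvLoopA]
    have hcond : ((res.map (fun c => pvHasX c)).contains true) = false := by
      simp only [List.contains_eq_mem, List.mem_map, decide_eq_false_iff_not]
      rintro ⟨x, hx, hX⟩
      have : 'X' ∈ x.toList := by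
        have h1 := hasX_eq x
        rw [hX] at h1
        simpa using h1.symm
      have := h0 x hx
      rw [List.count_eq_zero] at this
      exact this ‹'X' ∈ x.toList›
    rw [if_neg (by rw [hcond]; simp)]
    rfl
  | succ c ihc =>
    intro fuel res hf hcnt
    obtain ⟨f, rfl⟩ : ∃ f, fuel = f + 1 := ⟨fuel - 1, by omega⟩
    match res with
    | [] =>
      rw [pvLoopA]
      simp [expandN_nil]
    | y :: res' =>
      have hall : ∀ x ∈ y :: res', pvHasX x = true := by
        intro x hx
        have hxc := hcnt x hx
        have hmem : 'X' ∈ x.toList := by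
          rw [← List.count_pos_iff]
          omega
        rw [hasX_eq]
        simpa using hmem
      have hcond : (((y :: res').map (fun c => pvHasX c)).contains true) = true := by
        simp only [List.contains_eq_mem, List.mem_map, decide_eq_true_eq]
        exact ⟨y, by simp, hall y (by simp)⟩
      rw [pvLoopA, if_pos (by simpa using hcond)]
      have hp := pass_inv (y :: res') [] hall
      simp only [List.map_nil, List.nil_append, List.append_nil, List.length_nil,
        Nat.zero_add] at hp
      rw [hp, expandN]
      apply ihc f _ (by omega)
      intro x hx
      rcases List.mem_append.1 hx with h | h <;> rcases List.mem_map.1 h with ⟨z, hz, rfl⟩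
      · have hzc := hcnt z hz
        have hzm : 'X' ∈ z.toList := by rw [← List.count_pos_iff]; omega
        have := count_cRep '1' (by decide) z.toList hzm
        simp only [pvS1, String.toList_ofList]
        omega
      · have hzc := hcnt z hz
        have hzm : 'X' ∈ z.toList := by rw [← List.count_pos_iff]; omega
        have := count_cRep '0' (by decide) z.toList hzm
        simp only [pvS0, String.toList_ofList]
        omega

theorem interleave {α : Type} (n : Nat) (f : Nat → List α) :
    ((List.range (2 * n)).map f).flatten =
      ((List.range n).map (fun t => f (2 * t) ++ f (2 * t + 1))).flatten := by
  induction n with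
  | zero => rfl
  | succ n ih =>
    have h2 : 2 * (n + 1) = (2 * n + 1) + 1 := by ring
    rw [List.range_succ, h2, List.range_succ, List.range_succ]
    simp only [List.map_append, List.flatten_append, ih]
    simp [List.append_assoc]

theorem bA_succ (c t : Nat) (s : String) :
    bA (c + 1) t s = bA c (t / 2) (if t % 2 = 1 then pvS0 s else pvS1 s) := by
  by_cases h : t % 2 = 1 <;>
    simp [bA, bAL, h, pvS0, pvS1, String.toList_ofList]

theorem expandN_eq (c : Nat) : ∀ (res : List String),
    expandN c res = ((List.range (2 ^ c)).map (fun t => res.map (bA c t))).flatten := by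
  induction c with
  | zero =>
    intro res
    simp only [expandN, pow_zero, List.range_one, List.map_cons, List.map_nil,
      List.flatten_cons, List.flatten_nil, List.append_nil]
    symm
    rw [List.map_congr_left (fun z _ => by simp [bA, bAL] : ∀ z ∈ res, bA 0 0 z = id z),
      List.map_id]
  | succ c ih =>
    intro res
    have hpow : (2 : Nat) ^ (c + 1) = 2 * 2 ^ c := by ring
    rw [expandN, ih, hpow, interleave]
    congr 1
    apply List.map_congr_left
    intro t _
    have hb1 : ∀ z : String, bA (c + 1) (2 * t) z = bA c t (pvS1 z) := by
      intro z
      rw [bA_succ]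
      have h1 : (2 * t) % 2 = 0 := Nat.mul_mod_right 2 t
      have h2 : (2 * t) / 2 = t := Nat.mul_div_cancel_left t (by omega)
      rw [h1, h2]
      simp
    have hb0 : ∀ z : String, bA (c + 1) (2 * t + 1) z = bA c t (pvS0 z) := by
      intro z
      rw [bA_succ]
      have h1 : (2 * t + 1) % 2 = 1 := by omega
      have h2 : (2 * t + 1) / 2 = t := by omega
      rw [h1, h2]
      simp
    simp only [List.map_append, List.map_map]
    congr 1
    · apply List.map_congr_left; intro z _; simp [Function.comp, hb1]
    · apply List.map_congr_left; intro z _; simp [Function.comp, hb0]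

theorem xposP_aux (cs : List Char) : ∀ (k : Nat),
    (((PySem.List.enumerate cs (k : Int)).filter (fun pc => pc.2 == 'X')).map
      (fun pc => pc.1.toNat)) = (xpos cs).map (· + k) := by
  induction cs with
  | nil => intro k; simp [PySem.List.enumerate_nil, xpos]
  | cons c cs ih =>
    intro k
    rw [PySem.List.enumerate_cons, List.filter_cons]
    have hk1 : ((k : Int) + 1) = ((k + 1 : Nat) : Int) := by push_cast; ring
    by_cases hc : c = 'X'
    · subst hc
      rw [if_pos (by simp), List.map_cons, hk1, ih (k + 1)]
      simp only [xpos, if_pos rfl, List.map_cons, List.map_map]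
      congr 1
      · simp
      · rw [List.map_map]; apply List.map_congr_left; intro p _; simp [Function.comp]; omega
    · rw [if_neg (by simp [hc]), hk1, ih (k + 1)]
      simp only [xpos, if_neg hc]
      rw [List.map_map]; apply List.map_congr_left; intro p _; simp [Function.comp]; omega

theorem xposP_eq (cs : List Char) : pvXPositions cs = xpos cs := by
  have := xposP_aux cs 0
  simpa [pvXPositions] using this

theorem xpos_len (cs : List Char) : (xpos cs).length = cs.count 'X' := by
  induction cs with
  | nil => rfl
  | cons c cs ih =>
    by_cases hc : c = 'X'
    · subst hc; simp [xpos, List.count_cons, ih]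
    · simp [xpos, hc, List.count_cons, ih, Ne.symm hc]

theorem fill_shift (ps : List Nat) : ∀ (cur : List Char) (d : Char) (t : Nat),
    pvFill (d :: cur) (ps.map (· + 1)) t = d :: pvFill cur ps t := by
  induction ps with
  | nil => intro cur d t; rfl
  | cons p ps ih =>
    intro cur d t
    simp only [List.map_cons, pvFill, List.set_cons_succ]
    exact ih _ _ _

theorem bAL_cons (n : Nat) : ∀ (t : Nat) (d : Char) (cs : List Char), d ≠ 'X' →
    bAL n t (d :: cs) = d :: bAL n t cs := by
  induction n with
  | zero => intro t d cs _; rfl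
  | succ n ih =>
    intro t d cs hd
    simp only [bAL, cRep, if_neg hd]
    exact ih _ _ _ hd

theorem bAL_fill (cs : List Char) : ∀ (t : Nat),
    bAL (cs.count 'X') t cs = pvFill cs (xpos cs) t := by
  induction cs with
  | nil => intro t; rfl
  | cons c cs ih =>
    intro t
    by_cases hc : c = 'X'
    · subst hc
      have hcnt : ('X' :: cs).count 'X' = cs.count 'X' + 1 := by simp
      rw [hcnt]
      simp only [bAL, cRep, xpos, pvFill, List.set_cons_zero, if_true]
      have hch : (if t % 2 = 1 then '0' else '1') ≠ 'X' := by
        by_cases h : t % 2 = 1 <;> simp [h]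
      rw [bAL_cons _ _ _ _ hch, ih (t / 2), fill_shift]
    · have hcnt : (c :: cs).count 'X' = cs.count 'X' := by
        simp [hc]
      rw [hcnt, bAL_cons _ _ _ _ hc, ih t]
      simp only [xpos, if_neg hc, fill_shift]

theorem main_eq (s : String) : replace_xs s = replace_xs_alt s := by
  unfold replace_xs
  rw [loop_main (s.toList.count 'X') (s.toList.count 'X' + 1) [s] (by omega)
    (by intro x hx; simp at hx; subst hx; rfl)]
  rw [expandN_eq]
  simp only [replace_xs_alt]
  rw [xposP_eq, xpos_len]
  rw [← List.flatMap_def]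
  have hsingle : ∀ t : Nat, ([s].map (bA (s.toList.count 'X') t)) = [bA (s.toList.count 'X') t s] := by
    intro t; rfl
  simp only [hsingle]
  rw [← List.map_eq_flatMap]
  apply List.map_congr_left
  intro t _
  simp [bA, bAL_fill]

-- ===== VERDICT (by name: the statement is the Claim_ definition above) =====
theorem replace_xs_spec : Claim_equal_replace_xs := by
  intro s _
  show replace_xs s = replace_xs_alt s
  exact main_eq s
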